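-- pv_equiv track=rewrite | github.com/elpresidente2025/cyberbrain | functions/python/agents/common/h2_templates.py | _count_token_hits
-- ===== SOURCE A (Python) =====
-- from typing import Any, Dict, List, Optional, Sequence, Tuple
--
-- def _count_token_hits(text: str, tokens: Sequence[str]) -> int:
--     if not text or not tokens:
--         return 0
--     hits = 0
--     for token in tokens:
--         token_str = str(token or "").strip()
--         if token_str and token_str in text:
--             hits += 1
--     return hits
-- ===== SOURCE B (Python) =====
-- def _count_token_hits(text, tokens):
--     # Group duplicate tokens first: each distinct stripped token is tested
--     # against the text ONCE, then its multiplicity is added.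
--     freq = {}
--     for token in tokens:
--         t = str(token or "").strip()
--         if t:
--             freq[t] = freq.get(t, 0) + 1
--     hits = 0
--     for t, n in freq.items():
--         if t in text:
--             hits += n
--     return hits
-- ===== Notes on version B (the rewrite author's own statement) =====
-- stated objective: alternative
-- what changed: B groups the stripped tokens into a multiplicity dict first and runs one substring test per DISTINCT token, adding its count, instead of A's per-token test; A's early return on empty text/tokens disappears (the grouped sum is 0 there anyway).
import Mathlib
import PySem

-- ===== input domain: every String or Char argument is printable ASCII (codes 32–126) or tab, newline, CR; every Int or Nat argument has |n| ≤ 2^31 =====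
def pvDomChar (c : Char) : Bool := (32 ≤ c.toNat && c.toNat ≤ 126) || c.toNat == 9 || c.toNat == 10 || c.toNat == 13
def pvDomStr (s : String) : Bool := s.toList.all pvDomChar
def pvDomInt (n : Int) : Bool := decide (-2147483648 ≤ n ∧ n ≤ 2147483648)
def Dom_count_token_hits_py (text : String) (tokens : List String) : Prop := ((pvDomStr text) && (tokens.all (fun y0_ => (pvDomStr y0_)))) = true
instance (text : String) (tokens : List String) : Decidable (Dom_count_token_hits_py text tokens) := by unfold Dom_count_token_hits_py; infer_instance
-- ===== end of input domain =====

-- B groups the stripped tokens by multiplicity and runs one substring test per DISTINCT token (alternative decomposition, same result).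


-- ===== PORT A =====
def count_token_hits_py (text : String) (tokens : List String) : Int :=
  if text = "" ∨ tokens = [] then 0
  else
    tokens.foldl (fun hits token =>
      let token_str := PySem.Str.strip (if token == "" then "" else token)
      if !(token_str == "") && PySem.Str.isIn token_str text then hits + 1 else hits) 0

-- ===== PORT B =====
def count_token_hits_py_alt (text : String) (tokens : List String) : Int :=
  let freq := tokens.foldl (fun d token =>
      let t := PySem.Str.strip (if token == "" then "" else token)
      if t == "" then d else d.insert t (d.getD t 0 + 1)) PySem.Dict.empty
  freq.items.foldl (fun hits p =>
      if PySem.Str.isIn p.1 text then hits + p.2 else hits) 0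

-- ===== PRECONDITION & SPEC =====
def Spec_count_token_hits_py (text : String) (tokens : List String) (out : Int) : Prop := out = count_token_hits_py_alt text tokens
instance (text : String) (tokens : List String) (out : Int) : Decidable (Spec_count_token_hits_py text tokens out) := by unfold Spec_count_token_hits_py; infer_instance

-- ===== CLAIM (what is proved, stated in full; the proofs are below) =====
def Claim_equal_count_token_hits_py : Prop := ∀ (text : String) (tokens : List String), Dom_count_token_hits_py text tokens → Spec_count_token_hits_py text tokens (count_token_hits_py text tokens)

-- ===== LEMMAS AND PROOFS =====

-- (t or "") is t for a string
theorem pv_or_empty (t : String) : (if t == "" then "" else t) = t := by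
  by_cases h : t = "" <;> simp [h]

-- B's dict-building loop is the counter loop over the nonempty stripped tokens
theorem pv_build_freq :
    ∀ (l : List String) (d : PySem.Dict String Int),
      l.foldl (fun d token =>
          if PySem.Str.strip token == "" then d
          else d.insert (PySem.Str.strip token)
                 (d.getD (PySem.Str.strip token) 0 + 1)) d
        = ((l.map PySem.Str.strip).filter (fun t => !(t == ""))).foldl
            (fun d t => d.insert t (d.getD t 0 + 1)) d := by
  intro l
  induction l with
  | nil => intro d; rfl
  | cons a l ih =>
    intro d
    rw [List.foldl_cons, List.map_cons, List.filter_cons]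
    by_cases h : PySem.Str.strip a = ""
    · rw [if_pos (by simp [h]), if_neg (by simp [h]), ih]
    · rw [if_neg (by simp [h]), if_pos (by simp [h]), List.foldl_cons, ih]

-- the hit-summing loop is a sum
theorem pv_foldl_hits (text : String) :
    ∀ (l : List (String × Int)) (a : Int),
      l.foldl (fun hits p => if PySem.Str.isIn p.1 text then hits + p.2 else hits) a
        = a + (l.map (fun p => if PySem.Str.isIn p.1 text then p.2 else 0)).sum := by
  intro l
  induction l with
  | nil => intro a; simp
  | cons p l ih =>
    intro a
    rw [List.foldl_cons, List.map_cons, List.sum_cons, ih]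
    by_cases h : PySem.Str.isIn p.1 text = true
    · rw [if_pos h, if_pos h]; ring
    · rw [if_neg h, if_neg h]; ring

-- indicator sums over a list not containing a vanish
theorem pv_sum_indicator_zero (q : String → Bool) (a : String) :
    ∀ (s : List String), a ∉ s →
      (s.map (fun k => if q k && (a == k) then (1 : Int) else 0)).sum = 0 := by
  intro s
  induction s with
  | nil => intro _; simp
  | cons b s ih =>
    intro h
    have h1 : a ∉ s := fun hm => h (List.mem_cons_of_mem _ hm)
    have h2 : a ≠ b := fun he => h (by simp [he])
    rw [List.map_cons, List.sum_cons, ih h1, if_neg (by simp [h2])]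
    simp

-- indicator sum over a Nodup list containing a is the indicator at a
theorem pv_sum_indicator (q : String → Bool) (a : String) :
    ∀ (s : List String), s.Nodup → a ∈ s →
      (s.map (fun k => if q k && (a == k) then (1 : Int) else 0)).sum
        = if q a then 1 else 0 := by
  intro s
  induction s with
  | nil => intro _ h; simp at h
  | cons b s ih =>
    intro hnd hmem
    rw [List.map_cons, List.sum_cons]
    by_cases hba : a = b
    · subst hba
      have hns : a ∉ s := by simp_all
      rw [pv_sum_indicator_zero q a s hns]
      by_cases hq : q a = true
      · rw [if_pos (by simp [hq]), if_pos hq]; ring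
      · rw [if_neg (by simp [hq]), if_neg hq]; ring
    · have hms : a ∈ s := by
        rcases List.mem_cons.mp hmem with h | h
        · exact absurd h hba
        · exact h
      rw [if_neg (by simp [hba]), ih (by simp_all) hms]; ring

-- the grouped sum over the distinct elements equals the direct count
theorem pv_grouped_count (q : String → Bool) :
    ∀ (L : List String) (s : List String), s.Nodup → (∀ t ∈ L, t ∈ s) →
      (s.map (fun k => if q k then (L.count k : Int) else 0)).sum = (L.countP q : Int) := by
  intro L
  induction L with
  | nil => intro s _ _; simp
  | cons a L ih =>
    intro s hnd hsub
    have hfun : (fun k => if q k then ((a :: L).count k : Int) else 0)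
        = fun k => (if q k then (L.count k : Int) else 0)
             + (if q k && (a == k) then (1 : Int) else 0) := by
      funext k
      by_cases hq : q k = true <;> by_cases hak : a = k <;>
        simp [hq, hak]
    rw [hfun, PySem.List.sum_map_add_int,
      ih s hnd (fun t ht => hsub t (by simp [ht])),
      pv_sum_indicator q a s hnd (hsub a (by simp))]
    by_cases hq : q a = true <;> simp [hq]

-- B's value, in closed form
theorem pv_alt_eq (text : String) (tokens : List String) :
    count_token_hits_py_alt text tokens
      = (((tokens.map PySem.Str.strip).filter (fun t => !(t == ""))).countP
          (fun t => PySem.Str.isIn t text) : Int) := by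
  unfold count_token_hits_py_alt
  simp only [pv_or_empty]
  rw [pv_build_freq, PySem.Dict.foldl_insert_getD_add_one_eq_counter,
    PySem.Dict.items_counter, pv_foldl_hits, List.map_map]
  rw [show ((fun p : String × Int => if PySem.Str.isIn p.1 text then p.2 else 0) ∘
        fun k => (k, (((tokens.map PySem.Str.strip).filter (fun t => !(t == ""))).count k : Int)))
      = fun k => if PySem.Str.isIn k text then
          (((tokens.map PySem.Str.strip).filter (fun t => !(t == ""))).count k : Int) else 0 from rfl]
  rw [pv_grouped_count (fun t => PySem.Str.isIn t text) _ _
      (PySem.Set.nodup_ofList _) (fun t ht => (PySem.Set.mem_ofList _ _).mpr ht)]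
  ring

-- A's value, in the same closed form (outside the early return)
theorem pv_a_eq (text : String) (tokens : List String) :
    count_token_hits_py text tokens
      = if text = "" ∨ tokens = [] then 0
        else (((tokens.map PySem.Str.strip).filter (fun t => !(t == ""))).countP
               (fun t => PySem.Str.isIn t text) : Int) := by
  unfold count_token_hits_py
  by_cases h : text = "" ∨ tokens = []
  · simp [h]
  · rw [if_neg h, if_neg h]
    simp only [pv_or_empty]
    rw [PySem.List.foldl_count_if
        (fun token => !(PySem.Str.strip token == "") && PySem.Str.isIn (PySem.Str.strip token) text),
      List.countP_filter, List.countP_map, zero_add]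
    rw [show ((fun a => PySem.Str.isIn a text && !(a == "")) ∘ PySem.Str.strip)
      = fun token => PySem.Str.isIn (PySem.Str.strip token) text && !(PySem.Str.strip token == "")
      from rfl]
    congr 1
    apply List.countP_congr
    intro t _
    rw [Bool.and_comm]

-- a nonempty string is not a substring of the empty text
theorem pv_isIn_empty (t : String) (h : t ≠ "") : PySem.Str.isIn t "" = false := by
  rw [← Bool.not_eq_true, PySem.Str.isIn_iff_infix]
  intro hinf
  exact h (by simpa using hinf)

-- ===== VERDICT (by name: the statement is the Claim_ definition above) =====
theorem count_token_hits_py_spec : Claim_equal_count_token_hits_py := by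
  intro text tokens _
  unfold Spec_count_token_hits_py
  rw [pv_a_eq, pv_alt_eq]
  by_cases h : text = "" ∨ tokens = []
  · rw [if_pos h]
    rcases h with h | h
    · subst h
      have hz : (((tokens.map PySem.Str.strip).filter (fun t => !(t == ""))).countP
          (fun t => PySem.Str.isIn t "")) = 0 := by
        rw [List.countP_eq_zero]
        intro t ht
        have hne : t ≠ "" := by have := List.of_mem_filter ht; simpa using this
        rw [pv_isIn_empty t hne]; simp
      rw [hz]; simp
    · subst h; simp
  · rw [if_neg h]
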